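-- pv_equiv track=rewrite | github.com/rjbizsolution23-wq/CREDIT-INTELLIGENCE-PLATFORM | backend/ml/forecaster.py | calculate_milestones
-- ===== SOURCE A (Python) =====
-- from typing import Dict, List, Any, Tuple
--
-- def calculate_milestones(current_score: int, forecasted_scores: List[int],
--                        forecast_months: List[str]) -> Dict[str, str]:
--     """Calculate when credit score will hit key milestones"""
--     milestones = {}
--
--     milestone_targets = [600, 650, 700, 750, 800]
--
--     for target in milestone_targets:
--         if current_score < target:
--             # Find first month where score reaches target
--             for score, month in zip(forecasted_scores, forecast_months):
--                 if score >= target: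
--                     milestones[f'reach_{target}'] = month
--                     break
--
--     return milestones
-- ===== SOURCE B (Python) =====
-- def calculate_milestones(current_score, forecasted_scores, forecast_months):
--     """Calculate when credit score will hit key milestones"""
--     remaining = [t for t in (600, 650, 700, 750, 800) if current_score < t]
--     items = []
--     for score, month in zip(forecasted_scores, forecast_months):
--         items += [(f'reach_{t}', month) for t in remaining if t <= score]
--         remaining = [t for t in remaining if score < t]
--         if not remaining:
--             break
--     return dict(items)
-- ===== Notes on version B (the rewrite author's own statement) =====
-- stated objective: alternative
-- what changed: Inverts the loop nesting: instead of rescanning the forecast once per milestone target, B makes a single pass over the months in order, maintaining the list of targets not yet reached (seeded with those above current_score) and recording each target the first month its score is reached, with an early exit once no targets remain.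
import Mathlib
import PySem

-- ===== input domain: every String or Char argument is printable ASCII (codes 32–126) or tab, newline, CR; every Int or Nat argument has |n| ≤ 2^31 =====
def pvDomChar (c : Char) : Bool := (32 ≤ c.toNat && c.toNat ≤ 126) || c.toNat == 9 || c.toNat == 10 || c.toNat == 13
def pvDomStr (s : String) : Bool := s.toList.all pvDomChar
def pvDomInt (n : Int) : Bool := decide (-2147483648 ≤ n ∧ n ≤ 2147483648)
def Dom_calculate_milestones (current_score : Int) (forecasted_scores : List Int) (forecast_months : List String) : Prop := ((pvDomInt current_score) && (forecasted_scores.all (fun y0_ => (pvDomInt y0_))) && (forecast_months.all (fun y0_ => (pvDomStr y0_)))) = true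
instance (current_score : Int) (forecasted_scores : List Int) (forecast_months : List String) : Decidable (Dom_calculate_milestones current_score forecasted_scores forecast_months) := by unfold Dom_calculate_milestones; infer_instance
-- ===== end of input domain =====

-- B inverts A's loop nesting: one pass over the months maintaining the targets not yet reached,
-- instead of rescanning the forecast once per target; B returns A's exact result on all inputs.


-- ===== PORT A =====
-- f'reach_{target}'  (both Pythons build the key with this identical f-string)
def pvKey (t : Int) : String := "reach_" ++ PySem.Int.toStr t

-- A's inner loop: the first month of zip(forecasted_scores, forecast_months) whose score >= target (break)
def pvFindFirst (pairs : List (Int × String)) (target : Int) : Option String :=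
  match pairs with
  | [] => none
  | (s, m) :: rest => if target ≤ s then some m else pvFindFirst rest target

def calculate_milestones (current_score : Int) (forecasted_scores : List Int) (forecast_months : List String) : List (String × String) :=
  (([600, 650, 700, 750, 800] : List Int).foldl
    (fun d t =>
      if current_score < t then
        match pvFindFirst (forecasted_scores.zip forecast_months) t with
        | some m => d.insert (pvKey t) m
        | none => d
      else d)
    (PySem.Dict.empty : PySem.Dict String String)).items

-- ===== PORT B =====
-- B's month loop: record each remaining target this month's score reaches, drop it from
-- `remaining`, and stop early once no targets remain.
def pvLoopB (rem : List Int) (items : List (String × String)) (pairs : List (Int × String)) : List (String × String) :=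
  match pairs with
  | [] => items
  | (score, month) :: rest =>
    let items' := items ++ (rem.filter (fun t => decide (t ≤ score))).map (fun t => (pvKey t, month))
    let rem' := rem.filter (fun t => decide (score < t))
    if rem' = [] then items' else pvLoopB rem' items' rest

def calculate_milestones_alt (current_score : Int) (forecasted_scores : List Int) (forecast_months : List String) : List (String × String) :=
  pvLoopB (([600, 650, 700, 750, 800] : List Int).filter (fun t => decide (current_score < t)))
    [] (forecasted_scores.zip forecast_months)

-- ===== PRECONDITION & SPEC =====
def Spec_calculate_milestones (current_score : Int) (forecasted_scores : List Int) (forecast_months : List String) (out : List (String × String)) : Prop := out = calculate_milestones_alt current_score forecasted_scores forecast_months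
instance (current_score : Int) (forecasted_scores : List Int) (forecast_months : List String) (out : List (String × String)) : Decidable (Spec_calculate_milestones current_score forecasted_scores forecast_months out) := by unfold Spec_calculate_milestones; infer_instance

-- ===== CLAIM (what is proved, stated in full; the proofs are below) =====
def Claim_equal_calculate_milestones : Prop := ∀ (current_score : Int) (forecasted_scores : List Int) (forecast_months : List String), Dom_calculate_milestones current_score forecasted_scores forecast_months → Spec_calculate_milestones current_score forecasted_scores forecast_months (calculate_milestones current_score forecasted_scores forecast_months)

-- ===== LEMMAS AND PROOFS =====

-- the (key, month) entry both programs record for target t, as a function of the forecast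
def pvG (pairs : List (Int × String)) (t : Int) : Option (String × String) :=
  (pvFindFirst pairs t).map (fun m => (pvKey t, m))

-- an ascending list splits, in order, into its elements ≤ s followed by its elements > s
theorem pv_sorted_split (s : Int) : ∀ (rem : List Int), rem.Pairwise (· < ·) →
    rem.filter (fun t => decide (t ≤ s)) ++ rem.filter (fun t => decide (s < t)) = rem := by
  intro rem h
  induction rem with
  | nil => rfl
  | cons a l ih =>
    rcases List.pairwise_cons.mp h with ⟨ha, hl⟩
    by_cases hle : a ≤ s
    · simp [hle, not_lt.mpr hle, ih hl]
    · rw [not_le] at hle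
      have h1 : List.filter (fun t => decide (t ≤ s)) (a :: l) = [] := by
        rw [List.filter_eq_nil_iff]
        intro t ht
        simp only [decide_eq_true_eq]
        rcases List.mem_cons.mp ht with rfl | htl
        · omega
        · have := ha t htl; omega
      have h2 : List.filter (fun t => decide (s < t)) (a :: l) = a :: l := by
        rw [List.filter_eq_self]
        intro t ht
        simp only [decide_eq_true_eq]
        rcases List.mem_cons.mp ht with rfl | htl
        · omega
        · have := ha t htl; omega
      rw [h1, h2, List.nil_append]

-- B's loop records, for each still-remaining target in ascending order, its first reaching month
theorem pv_loopB_eq : ∀ (pairs : List (Int × String)) (rem : List Int) (items : List (String × String)),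
    rem.Pairwise (· < ·) → pvLoopB rem items pairs = items ++ rem.filterMap (pvG pairs) := by
  intro pairs
  induction pairs with
  | nil => intro rem items _; simp [pvLoopB, pvG, pvFindFirst]
  | cons p rest ih =>
    intro rem items hpw
    obtain ⟨score, month⟩ := p
    show (if rem.filter (fun t => decide (score < t)) = [] then
            items ++ (rem.filter (fun t => decide (t ≤ score))).map (fun t => (pvKey t, month))
          else pvLoopB (rem.filter (fun t => decide (score < t)))
            (items ++ (rem.filter (fun t => decide (t ≤ score))).map (fun t => (pvKey t, month))) rest)
        = items ++ rem.filterMap (pvG ((score, month) :: rest))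
    have hpw' : (rem.filter (fun t => decide (score < t))).Pairwise (· < ·) := hpw.filter _
    have hbr : (if rem.filter (fun t => decide (score < t)) = [] then
            items ++ (rem.filter (fun t => decide (t ≤ score))).map (fun t => (pvKey t, month))
          else pvLoopB (rem.filter (fun t => decide (score < t)))
            (items ++ (rem.filter (fun t => decide (t ≤ score))).map (fun t => (pvKey t, month))) rest)
        = pvLoopB (rem.filter (fun t => decide (score < t)))
            (items ++ (rem.filter (fun t => decide (t ≤ score))).map (fun t => (pvKey t, month))) rest := by
      split_ifs with h
      · rw [h, ih [] _ (by simp)]; simp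
      · rfl
    rw [hbr, ih _ _ hpw']
    conv_rhs => rw [← pv_sorted_split score rem hpw]
    rw [List.filterMap_append]
    have hmap : (rem.filter (fun t => decide (t ≤ score))).filterMap (pvG ((score, month) :: rest))
        = (rem.filter (fun t => decide (t ≤ score))).map (fun t => (pvKey t, month)) := by
      rw [List.filterMap_congr (g := fun t => some (pvKey t, month)) ?_]
      · simp
      intro t ht
      have := List.of_mem_filter ht
      simp only [decide_eq_true_eq] at this
      simp [pvG, pvFindFirst, this]
    have hrest : (rem.filter (fun t => decide (score < t))).filterMap (pvG ((score, month) :: rest))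
        = (rem.filter (fun t => decide (score < t))).filterMap (pvG rest) := by
      apply List.filterMap_congr
      intro t ht
      have := List.of_mem_filter ht
      simp only [decide_eq_true_eq] at this
      simp [pvG, pvFindFirst, not_le.mpr this]
    rw [hmap, hrest, List.append_assoc]

-- A's dict-building fold appends one fresh-keyed entry per satisfied target, in target order
theorem pv_foldA_eq (c : Int) (pairs : List (Int × String)) : ∀ (ts : List Int) (d : PySem.Dict String String),
    d.keys.Nodup → (∀ t ∈ ts, d.contains (pvKey t) = false) →
    ts.Pairwise (fun a b => pvKey a ≠ pvKey b) →
    (ts.foldl (fun d t =>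
      if c < t then
        match pvFindFirst pairs t with
        | some m => d.insert (pvKey t) m
        | none => d
      else d) d).items = d.items ++ ts.filterMap (fun t => if c < t then pvG pairs t else none) := by
  intro ts
  induction ts with
  | nil => intro d _ _ _; simp
  | cons t ts' ih =>
    intro d hnd hfresh hpw
    rcases List.pairwise_cons.mp hpw with ⟨hne, hpw'⟩
    rw [List.foldl_cons, List.filterMap_cons]
    by_cases hc : c < t
    · cases hff : pvFindFirst pairs t with
      | none =>
        simp only [hc, if_true]
        rw [ih d hnd (fun t' ht' => hfresh t' (List.mem_cons_of_mem _ ht')) hpw']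
        simp [pvG, hff]
      | some m =>
        simp only [hc, if_true]
        have hfr : d.contains (pvKey t) = false := hfresh t (List.mem_cons_self ..)
        have hnd' : (d.insert (pvKey t) m).keys.Nodup := PySem.Dict.nodup_keys_insert d _ _ hnd
        have hfresh' : ∀ t' ∈ ts', (d.insert (pvKey t) m).contains (pvKey t') = false := by
          intro t' ht'
          rw [PySem.Dict.contains_insert]
          simp only [Bool.or_eq_false_iff]
          exact ⟨beq_eq_false_iff_ne.mpr (hne t' ht').symm, hfresh t' (List.mem_cons_of_mem _ ht')⟩
        rw [ih _ hnd' hfresh' hpw']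
        rw [PySem.Dict.items_insert_of_not_contains d m hfr]
        simp [pvG, hff]
    · simp only [hc, if_false]
      rw [ih d hnd (fun t' ht' => hfresh t' (List.mem_cons_of_mem _ ht')) hpw']

-- pushing A's current_score < target guard into a filter over the target list
theorem pv_filterMap_guard (c : Int) (g : Int → Option (String × String)) : ∀ (ts : List Int),
    ts.filterMap (fun t => if c < t then g t else none)
      = (ts.filter (fun t => decide (c < t))).filterMap g := by
  intro ts
  induction ts with
  | nil => rfl
  | cons a l ih => by_cases h : c < a <;> simp [List.filterMap_cons, h, ih]

-- ===== VERDICT (by name: the statement is the Claim_ definition above) =====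
theorem calculate_milestones_spec : Claim_equal_calculate_milestones := by
  intro c fs ms _
  unfold Spec_calculate_milestones calculate_milestones calculate_milestones_alt
  rw [pv_foldA_eq c (fs.zip ms) _ _ (by decide) (by decide) (by decide)]
  rw [pv_filterMap_guard c (pvG (fs.zip ms))]
  rw [pv_loopB_eq (fs.zip ms) _ [] (List.Pairwise.filter _ (by decide))]
  simp [PySem.Dict.empty]
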